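-- pv_equiv track=rewrite | github.com/Halophilus/Facebook-Chatbot | main.py | megaPhrasinator
-- ===== SOURCE A (Python) =====
-- def megaPhrasinator(megaPhrase):
--     '''
--     Processes a large string and generates a word count dictionary for Markov model.
--     Args:
--         megaPhrase (str): String to be processed.
--     Returns:
--         wordCount (dict): Dictionary mapping each word to the subsequent word's frequency.
--     '''
--     # Preprocess the phrase for consistency
--     megaPhrase = (megaPhrase.lower().replace(".", " .").replace(",", " ,")
--                   .replace("!"," !").replace("?"," ?").replace("\n"," ")
--                   .replace("_"," ").replace("/"," or ").replace('"',' ')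
--                   .replace('-',' '))
--
--     words = megaPhrase.split(" ")
--     wordCount = {}
--     for i in range(len(words) - 1):
--         firstWord, secondWord = words[i], words[i + 1]
--         if firstWord not in wordCount:
--             wordCount[firstWord] = {}
--         frequencies = wordCount[firstWord]
--         frequencies[secondWord] = frequencies.get(secondWord, 0) + 1
--     return wordCount
-- ===== SOURCE B (Python) =====
-- def megaPhrasinator(megaPhrase):
--     # Same preprocessing as the original, then a declarative rebuild:
--     # dict comprehension over the deduplicated first words, counting each
--     # (first, second) pair directly in the adjacent-pair list.
--     megaPhrase = (megaPhrase.lower().replace(".", " .").replace(",", " ,")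
--                   .replace("!", " !").replace("?", " ?").replace("\n", " ")
--                   .replace("_", " ").replace("/", " or ").replace('"', ' ')
--                   .replace('-', ' '))
--     words = megaPhrase.split(" ")
--     pairs = list(zip(words, words[1:]))
--     return {f: {s: pairs.count((f, s))
--                 for s in dict.fromkeys(s2 for f2, s2 in pairs if f2 == f)}
--             for f in dict.fromkeys(f for f, _ in pairs)}
-- ===== Notes on version B (the rewrite author's own statement) =====
-- stated objective: alternative
-- what changed: Replaces A's index loop with streaming nested-dict updates by a declarative rebuild: form the adjacent-pair list once, then a dict comprehension over the deduplicated first words whose inner dicts count each (first, second) pair directly with pairs.count.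
import Mathlib
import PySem

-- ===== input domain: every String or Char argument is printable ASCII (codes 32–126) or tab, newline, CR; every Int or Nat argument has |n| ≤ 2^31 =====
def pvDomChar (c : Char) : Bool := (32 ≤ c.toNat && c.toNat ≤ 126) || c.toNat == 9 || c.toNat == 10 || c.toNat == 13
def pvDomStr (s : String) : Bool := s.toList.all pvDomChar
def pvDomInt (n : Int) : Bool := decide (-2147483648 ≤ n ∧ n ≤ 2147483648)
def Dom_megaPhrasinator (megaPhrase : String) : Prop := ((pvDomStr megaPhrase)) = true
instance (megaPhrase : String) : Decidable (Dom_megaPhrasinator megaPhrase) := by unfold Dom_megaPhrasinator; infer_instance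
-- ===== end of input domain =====

-- B rebuilds the table declaratively (dedup of first words + per-pair counting over the
-- adjacent-pair list) instead of A's streaming nested-dict updates; objective: alternative.

-- ===== PORT A =====
-- Literal port of A: preprocessing replace-chain, split on " ", then an index loop
-- i ∈ range(len(words)-1) updating wordCount[words[i]][words[i+1]].
-- (both indices are always in range, so pyGetD's default "" is never consulted)
def megaPhrasinator (megaPhrase : String) : List (String × List (String × Int)) :=
  let mp := (((((((((PySem.Str.lower megaPhrase).replace "." " .").replace "," " ,").replace
      "!" " !").replace "?" " ?").replace "\n" " ").replace "_" " ").replace "/" " or ").replace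
      "\"" " ").replace "-" " "
  let words := (PySem.Str.split? mp " ").getD []   -- sep " " is nonempty, split? is always some
  let wordCount :=
    (PySem.List.pyRange 0 ((words.length : Int) - 1) 1).foldl
      (fun d i =>
        let firstWord := PySem.List.pyGetD words i ""
        let secondWord := PySem.List.pyGetD words (i + 1) ""
        let d' := if d.contains firstWord then d else d.insert firstWord PySem.Dict.empty
        let frequencies := d'.getD firstWord PySem.Dict.empty
        d'.insert firstWord (frequencies.insert secondWord (frequencies.getD secondWord 0 + 1)))
      PySem.Dict.empty
  wordCount.items.map (fun p => (p.1, p.2.items))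

-- ===== PORT B =====
-- Literal port of B: same preprocessing, pairs = zip(words, words[1:]), then the dict
-- comprehension over the deduplicated first words, counting each pair with pairs.count.
def megaPhrasinator_alt (megaPhrase : String) : List (String × List (String × Int)) :=
  let mp := (((((((((PySem.Str.lower megaPhrase).replace "." " .").replace "," " ,").replace
      "!" " !").replace "?" " ?").replace "\n" " ").replace "_" " ").replace "/" " or ").replace
      "\"" " ").replace "-" " "
  let words := (PySem.Str.split? mp " ").getD []   -- sep " " is nonempty, split? is always some
  let pairs := words.zip (PySem.List.slice words (some 1) none)
  (PySem.List.dedup (pairs.map (fun p => p.1))).map (fun f =>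
    (f, (PySem.List.dedup ((pairs.filter (fun p => p.1 == f)).map (fun p => p.2))).map
          (fun s => (s, (pairs.count (f, s) : Int)))))

-- ===== PRECONDITION & SPEC =====
def Spec_megaPhrasinator (megaPhrase : String) (out : List (String × List (String × Int))) : Prop := out = megaPhrasinator_alt megaPhrase
instance (megaPhrase : String) (out : List (String × List (String × Int))) : Decidable (Spec_megaPhrasinator megaPhrase out) := by unfold Spec_megaPhrasinator; infer_instance

-- ===== CLAIM (what is proved, stated in full; the proofs are below) =====
def Claim_equal_megaPhrasinator : Prop := ∀ (megaPhrase : String), Dom_megaPhrasinator megaPhrase → Spec_megaPhrasinator megaPhrase (megaPhrasinator megaPhrase)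

-- ===== LEMMAS AND PROOFS =====


def aStep (d : PySem.Dict String (PySem.Dict String Int)) (p : String × String) :
    PySem.Dict String (PySem.Dict String Int) :=
  let d' := if d.contains p.1 then d else d.insert p.1 PySem.Dict.empty
  let frequencies := d'.getD p.1 PySem.Dict.empty
  d'.insert p.1 (frequencies.insert p.2 (frequencies.getD p.2 0 + 1))

def innerL (ps : List (String × String)) (f : String) : List (String × Int) :=
  (PySem.List.dedup ((ps.filter (fun p => p.1 == f)).map (fun p => p.2))).map
    (fun s => (s, (ps.count (f, s) : Int)))

def canon (ps : List (String × String)) : List (String × List (String × Int)) :=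
  (PySem.List.dedup (ps.map (fun p => p.1))).map (fun f => (f, innerL ps f))

lemma dedup_append_singleton {α : Type} [DecidableEq α] (xs : List α) (x : α) :
    PySem.List.dedup (xs ++ [x]) =
      if x ∈ xs then PySem.List.dedup xs else PySem.List.dedup xs ++ [x] := by
  simp only [PySem.List.dedup_eq_ofList, PySem.Set.ofList_append_singleton,
    PySem.Set.add_eq_ite, PySem.Set.mem_ofList]

lemma count_eq_zero_of_not_mem_seconds (ps : List (String × String)) (f s : String)
    (h : s ∉ (ps.filter (fun p => p.1 == f)).map (fun p => p.2)) :
    ps.count (f, s) = 0 := by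
  rw [List.count_eq_zero]
  intro hmem
  exact h (List.mem_map.mpr ⟨(f, s), List.mem_filter.mpr ⟨hmem, by simp⟩, rfl⟩)

lemma count_append_single_ne (ps : List (String × String)) (f s f' s' : String)
    (hne : (f', s') ≠ (f, s)) :
    (ps ++ [(f, s)]).count (f', s') = ps.count (f', s') := by
  have hcnt : List.count (f', s') [(f, s)] = 0 := by
    rw [List.count_eq_zero]
    intro hm
    simp only [List.mem_singleton] at hm
    exact hne hm
  rw [List.count_append, hcnt]
  omega

lemma innerL_append_of_ne (ps : List (String × String)) (f s f' : String) (hne : f ≠ f') :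
    innerL (ps ++ [(f, s)]) f' = innerL ps f' := by
  unfold innerL
  have hfil : (ps ++ [(f, s)]).filter (fun p => p.1 == f') = ps.filter (fun p => p.1 == f') := by
    simp [List.filter_append, hne]
  rw [hfil]
  apply List.map_congr_left
  intro s' _
  rw [count_append_single_ne ps f s f' s' (by simp [hne.symm])]

-- innerL of the appended list at f itself
lemma innerL_append_self (ps : List (String × String)) (f s : String) :
    innerL (ps ++ [(f, s)]) f =
      if s ∈ (ps.filter (fun p => p.1 == f)).map (fun p => p.2) then
        (innerL ps f).map (fun q => if q.1 == s then (s, (ps.count (f, s) : Int) + 1) else q)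
      else innerL ps f ++ [(s, (ps.count (f, s) : Int) + 1)] := by
  unfold innerL
  have hfil : (ps ++ [(f, s)]).filter (fun p => p.1 == f) =
      ps.filter (fun p => p.1 == f) ++ [(f, s)] := by
    simp [List.filter_append]
  rw [hfil, List.map_append]
  simp only [List.map_cons, List.map_nil]
  rw [dedup_append_singleton]
  set sec := (ps.filter (fun p => p.1 == f)).map (fun p => p.2) with hsec
  by_cases hs : s ∈ sec
  · rw [if_pos hs, if_pos hs, List.map_map]
    apply List.map_congr_left
    intro s' hs'
    by_cases h' : s' = s
    · subst h'
      simp only [Function.comp_apply, beq_self_eq_true, if_pos]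
      rw [List.count_append, List.count_singleton, if_pos (by simp)]
      push_cast
      rfl
    · simp only [Function.comp_apply]
      rw [if_neg (by simpa using h'),
        count_append_single_ne ps f s f s' (by simp [h'])]
  · rw [if_neg hs, if_neg hs, List.map_append]
    simp only [List.map_cons, List.map_nil]
    congr 1
    · apply List.map_congr_left
      intro s' hs'
      have h' : s' ≠ s := fun h => hs (h ▸ (PySem.List.mem_dedup _ _).mp hs')
      rw [count_append_single_ne ps f s f s' (by simp [h'])]
    · rw [List.count_append, List.count_singleton, if_pos (by simp),
        count_eq_zero_of_not_mem_seconds ps f s hs]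
      norm_num

lemma contains_mk_innerL (ps : List (String × String)) (f s : String) :
    (PySem.Dict.mk (innerL ps f)).contains s =
      decide (s ∈ (ps.filter (fun p => p.1 == f)).map (fun p => p.2)) := by
  rw [PySem.Dict.contains_eq_decide_mem_keys, PySem.Dict.keys_mk]
  unfold innerL
  rw [List.map_map]
  simp [Function.comp_def, PySem.List.mem_dedup]

lemma main_lemma (ps : List (String × String)) :
    (ps.foldl aStep PySem.Dict.empty).items =
      (canon ps).map (fun e => (e.1, PySem.Dict.mk e.2)) := by
  induction ps using List.reverseRecOn with
  | nil => simp [canon, PySem.List.dedup_eq_ofList, PySem.Set.ofList]; rfl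
  | append_singleton ps p ih =>
    obtain ⟨f, s⟩ := p
    rw [List.foldl_append, List.foldl_cons, List.foldl_nil]
    set D := ps.foldl aStep PySem.Dict.empty with hD
    have hkeys : D.keys = PySem.List.dedup (ps.map (fun p => p.1)) := by
      show D.items.map (fun x => x.1) = _
      rw [ih]
      simp [canon, List.map_map, Function.comp_def]
    have hnd : D.keys.Nodup := by rw [hkeys]; exact PySem.List.nodup_dedup _
    -- canon of the appended list, outer structure
    have hcanon : canon (ps ++ [(f, s)]) =
        if f ∈ ps.map (fun p => p.1) then
          (PySem.List.dedup (ps.map (fun p => p.1))).map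
            (fun f' => (f', innerL (ps ++ [(f, s)]) f'))
        else canon ps ++ [(f, innerL (ps ++ [(f, s)]) f)] := by
      unfold canon
      rw [List.map_append]
      simp only [List.map_cons, List.map_nil]
      rw [dedup_append_singleton]
      by_cases hf : f ∈ ps.map (fun p => p.1)
      · rw [if_pos hf, if_pos hf]
      · rw [if_neg hf, if_neg hf, List.map_append]
        simp only [List.map_cons, List.map_nil]
        congr 1
        apply List.map_congr_left
        intro f' hf'
        have : f ≠ f' := fun h => hf (h ▸ (PySem.List.mem_dedup _ _).mp hf')
        rw [innerL_append_of_ne ps f s f' this]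
    by_cases hf : f ∈ ps.map (fun p => p.1)
    · -- f already a key of D
      have hc : D.contains f = true := by
        rw [PySem.Dict.contains_eq_decide_mem_keys, hkeys]
        simp [PySem.List.mem_dedup, hf]
      have hmemD : (f, PySem.Dict.mk (innerL ps f)) ∈ D.items := by
        rw [ih]
        exact List.mem_map.mpr ⟨(f, innerL ps f),
          List.mem_map.mpr ⟨f, (PySem.List.mem_dedup _ _).mpr hf, rfl⟩, rfl⟩
      have hfreq : D.getD f PySem.Dict.empty = PySem.Dict.mk (innerL ps f) :=
        PySem.Dict.getD_of_mem_items D hmemD hnd _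
      have hstep : aStep D (f, s) =
          D.insert f ((PySem.Dict.mk (innerL ps f)).insert s
            ((PySem.Dict.mk (innerL ps f)).getD s 0 + 1)) := by
        unfold aStep
        rw [hc]
        simp [hfreq]
      rw [hstep]
      set sec := (ps.filter (fun p => p.1 == f)).map (fun p => p.2) with hsec
      have hndsec : ((PySem.Dict.mk (innerL ps f)).keys).Nodup := by
        rw [PySem.Dict.keys_mk]
        unfold innerL
        rw [List.map_map]
        simpa [Function.comp_def] using PySem.List.nodup_dedup (α := String) sec
      have hget : (PySem.Dict.mk (innerL ps f)).getD s 0 = (ps.count (f, s) : Int) := by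
        by_cases hs : s ∈ sec
        · apply PySem.Dict.getD_of_mem_items _ _ hndsec
          unfold innerL
          exact List.mem_map.mpr ⟨s, (PySem.List.mem_dedup _ _).mpr hs, rfl⟩
        · rw [PySem.Dict.getD_of_not_contains _ _ (by rw [contains_mk_innerL]; exact decide_eq_false hs)]
          rw [count_eq_zero_of_not_mem_seconds ps f s hs]
          rfl
      rw [hget]
      have hX : ((PySem.Dict.mk (innerL ps f)).insert s ((ps.count (f, s) : Int) + 1)).items =
          innerL (ps ++ [(f, s)]) f := by
        rw [innerL_append_self]
        by_cases hs : s ∈ sec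
        · rw [if_pos hs]
          rw [PySem.Dict.items_insert_of_contains _ _ (by rw [contains_mk_innerL]; exact decide_eq_true hs)]
        · rw [if_neg hs]
          rw [PySem.Dict.items_insert_of_not_contains _ _ (by rw [contains_mk_innerL]; exact decide_eq_false hs)]
      rw [PySem.Dict.items_insert_of_contains D _ hc, ih, hcanon, if_pos hf]
      unfold canon
      rw [List.map_map, List.map_map, List.map_map]
      apply List.map_congr_left
      intro f' hf'
      by_cases h' : f' = f
      · subst h'
        simp only [Function.comp_apply, beq_self_eq_true, if_pos]
        exact Prod.ext rfl (PySem.Dict.ext hX)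
      · simp only [Function.comp_apply]
        rw [if_neg (by simpa using h'),
          innerL_append_of_ne ps f s f' (fun h => h' h.symm)]
    · -- f is a new key
      have hc : D.contains f = false := by
        rw [PySem.Dict.contains_eq_decide_mem_keys, hkeys]
        simp [PySem.List.mem_dedup, hf]
      have hstep : aStep D (f, s) =
          D.insert f (PySem.Dict.mk [(s, 1)]) := by
        unfold aStep
        rw [hc]
        simp only [if_neg (by simp : ¬false = true)]
        rw [PySem.Dict.getD_insert_self, PySem.Dict.insert_insert_self,
          PySem.Dict.getD_empty]
        exact congrArg _ (PySem.Dict.ext (by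
          rw [PySem.Dict.items_insert_of_not_contains _ _ (PySem.Dict.contains_empty s)]
          simp [PySem.Dict.empty]))
      rw [hstep, PySem.Dict.items_insert_of_not_contains D _ hc, ih, hcanon, if_neg hf,
        List.map_append]
      simp only [List.map_cons, List.map_nil]
      congr 2
      have hfilnil : ps.filter (fun p => p.1 == f) = [] := by
        rw [List.filter_eq_nil_iff]
        intro p hp
        simp only [beq_iff_eq]
        exact fun h => hf (List.mem_map.mpr ⟨p, hp, h⟩)
      have : innerL (ps ++ [(f, s)]) f = [(s, 1)] := by
        unfold innerL
        rw [List.filter_append, hfilnil]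
        simp only [List.nil_append]
        have hcnt : (ps ++ [(f, s)]).count (f, s) = 1 := by
          rw [List.count_append, List.count_eq_zero.mpr
            (fun h => hf (List.mem_map.mpr ⟨(f, s), h, rfl⟩)), List.count_singleton]
          simp
        have hone : List.filter (fun p => p.1 == f) [(f, s)] = [(f, s)] := by simp
        rw [hone]
        simp only [List.map_cons, List.map_nil]
        rw [show PySem.List.dedup [s] = [s] from by
          rw [PySem.List.dedup_eq_ofList]
          exact PySem.Set.ofList_eq_self_of_nodup _ (List.nodup_singleton s)]
        simp only [List.map_cons, List.map_nil]
        rw [hcnt]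
        norm_num
      rw [this]


lemma pairs_eq_zip_tail {α : Type} (xs : List α) (d : α) :
    (PySem.List.pyRange 0 ((xs.length : Int) - 1) 1).map
        (fun j => (PySem.List.pyGetD xs j d, PySem.List.pyGetD xs (j + 1) d)) =
      xs.zip xs.tail := by
  apply List.ext_getElem
  · simp [PySem.List.length_pyRange_one, List.length_zip]
  · intro i h1 h2
    have hlen : i + 1 < xs.length := by
      simp [PySem.List.length_pyRange_one] at h1; omega
    simp only [List.getElem_map, PySem.List.getElem_pyRange_one, List.getElem_zip,
      List.getElem_tail]
    have h0 : (0 : Int) + (i : Int) = ((i : Nat) : Int) := by ring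
    rw [h0, PySem.List.pyGetD_natCast]
    have h1' : ((i : Nat) : Int) + 1 = (((i + 1 : Nat)) : Int) := by push_cast; ring
    rw [h1', PySem.List.pyGetD_natCast]
    rw [List.getD_eq_getElem _ d (by omega), List.getD_eq_getElem _ d hlen]

lemma fold_eq_zip_fold {β : Type} (xs : List String) (init : β)
    (g : β → String → String → β) :
    (PySem.List.pyRange 0 ((xs.length : Int) - 1) 1).foldl
        (fun acc i => g acc (PySem.List.pyGetD xs i "") (PySem.List.pyGetD xs (i + 1) "")) init =
      (xs.zip xs.tail).foldl (fun acc p => g acc p.1 p.2) init := by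
  rw [← pairs_eq_zip_tail xs "", List.foldl_map]

-- the two preprocessing-independent shapes agree on any word list
lemma both_folds (ws : List String) :
    ((PySem.List.pyRange 0 ((ws.length : Int) - 1) 1).foldl
        (fun d i =>
          let firstWord := PySem.List.pyGetD ws i ""
          let secondWord := PySem.List.pyGetD ws (i + 1) ""
          let d' := if d.contains firstWord then d else d.insert firstWord PySem.Dict.empty
          let frequencies := d'.getD firstWord PySem.Dict.empty
          d'.insert firstWord (frequencies.insert secondWord (frequencies.getD secondWord 0 + 1)))
        PySem.Dict.empty).items.map (fun p => (p.1, p.2.items)) =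
      canon (ws.zip ws.tail) := by
  have h : (PySem.List.pyRange 0 ((ws.length : Int) - 1) 1).foldl
        (fun d i =>
          let firstWord := PySem.List.pyGetD ws i ""
          let secondWord := PySem.List.pyGetD ws (i + 1) ""
          let d' := if d.contains firstWord then d else d.insert firstWord PySem.Dict.empty
          let frequencies := d'.getD firstWord PySem.Dict.empty
          d'.insert firstWord (frequencies.insert secondWord (frequencies.getD secondWord 0 + 1)))
        PySem.Dict.empty = (ws.zip ws.tail).foldl aStep PySem.Dict.empty :=
    fold_eq_zip_fold ws PySem.Dict.empty
      (fun d fw sw =>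
        let d' := if d.contains fw then d else d.insert fw PySem.Dict.empty
        let frequencies := d'.getD fw PySem.Dict.empty
        d'.insert fw (frequencies.insert sw (frequencies.getD sw 0 + 1)))
  rw [h, main_lemma, List.map_map]
  simp [canon]

theorem megaPhrasinator_spec_aux (s0 : String) :
    megaPhrasinator s0 = megaPhrasinator_alt s0 := by
  unfold megaPhrasinator megaPhrasinator_alt
  simp only [PySem.List.slice_from_one]
  exact both_folds _

-- ===== VERDICT (by name: the statement is the Claim_ definition above) =====
theorem megaPhrasinator_spec : Claim_equal_megaPhrasinator := by
  intro s0 _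
  show megaPhrasinator s0 = megaPhrasinator_alt s0
  exact megaPhrasinator_spec_aux s0
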